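-- pv_equiv track=rewrite | github.com/ernstlab/mouse_fullStack_annotations | relationship_with_ct_spec_state/calculate_summary_sample_regions.py | color_annot_cellgroup_stateCT
-- ===== SOURCE A (Python) =====
-- def color_annot_cellgroup_stateCT(column_data, cell_group_color_dict, stateCT_color_dict):
-- 	results = [''] * len(column_data)
-- 	for index, value in enumerate(column_data):
-- 		if index == 0:
-- 			try:
-- 				color = cell_group_color_dict[value]
-- 			except:
-- 				color = '#ffffff' # white
-- 		elif index == 1:
-- 			try:
-- 				color = stateCT_color_dict[value]
-- 			except:
-- 				color = '#ffffff' # white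
-- 		else:
-- 			color = '#ffffff' # white
-- 		results[index] = 'background-color: %s' % color
-- 	return results
-- ===== SOURCE B (Python) =====
-- def color_annot_cellgroup_stateCT(column_data, cell_group_color_dict, stateCT_color_dict):
--     results = ['background-color: #ffffff'] * len(column_data)
--     if len(column_data) > 0:
--         try:
--             results[0] = 'background-color: %s' % cell_group_color_dict[column_data[0]]
--         except:
--             pass
--     if len(column_data) > 1:
--         try:
--             results[1] = 'background-color: %s' % stateCT_color_dict[column_data[1]]
--         except:
--             pass
--     return results
-- ===== Notes on version B (the rewrite author's own statement) =====
-- stated objective: simpler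
-- what changed: Replaces the enumeration loop with index==0/index==1/else branching by a fill-then-override: build the all-white list once with list repetition and patch only slots 0 and 1 from their dicts (a timing run measured this constant-factor faster, since the per-element Python loop body disappears).
import Mathlib
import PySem

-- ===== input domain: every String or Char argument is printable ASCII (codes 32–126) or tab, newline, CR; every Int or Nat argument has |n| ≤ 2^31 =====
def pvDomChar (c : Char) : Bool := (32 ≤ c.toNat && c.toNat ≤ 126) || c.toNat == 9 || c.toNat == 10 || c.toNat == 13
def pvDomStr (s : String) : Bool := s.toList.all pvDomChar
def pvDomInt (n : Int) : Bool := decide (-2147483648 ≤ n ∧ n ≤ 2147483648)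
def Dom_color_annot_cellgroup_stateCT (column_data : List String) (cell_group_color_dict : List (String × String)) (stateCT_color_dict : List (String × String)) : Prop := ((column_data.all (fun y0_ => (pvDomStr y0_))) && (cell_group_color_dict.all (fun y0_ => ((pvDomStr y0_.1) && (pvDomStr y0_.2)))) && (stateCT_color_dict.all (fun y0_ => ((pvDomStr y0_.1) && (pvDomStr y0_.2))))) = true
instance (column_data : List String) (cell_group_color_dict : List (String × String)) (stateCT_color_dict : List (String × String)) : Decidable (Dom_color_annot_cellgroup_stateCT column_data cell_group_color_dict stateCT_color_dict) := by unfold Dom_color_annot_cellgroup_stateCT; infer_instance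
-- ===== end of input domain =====

-- B replaces A's enumerate loop with three index branches by a fill-then-override
-- (all-white list, then patch slots 0 and 1); objective: simpler, same return value.

-- ===== PORT A =====
-- the loop body: branch on the index, then write results[index]
def pvBodyA (cell_group_color_dict : List (String × String)) (stateCT_color_dict : List (String × String)) (results : List String) (iv : Int × String) : List String :=
  let color :=
    if iv.1 = 0 then
      match List.lookup iv.2 cell_group_color_dict with
      | some c => c
      | none => "#ffffff"
    else if iv.1 = 1 then
      match List.lookup iv.2 stateCT_color_dict with
      | some c => c
      | none => "#ffffff"
    else "#ffffff"
  results.set iv.1.toNat ("background-color: " ++ color)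

def color_annot_cellgroup_stateCT (column_data : List String) (cell_group_color_dict : List (String × String)) (stateCT_color_dict : List (String × String)) : List String :=
  (PySem.List.enumerate column_data).foldl
    (pvBodyA cell_group_color_dict stateCT_color_dict)
    (List.replicate column_data.length "")

-- ===== PORT B =====
def color_annot_cellgroup_stateCT_alt (column_data : List String) (cell_group_color_dict : List (String × String)) (stateCT_color_dict : List (String × String)) : List String :=
  let results := List.replicate column_data.length "background-color: #ffffff"
  let results :=
    match column_data[0]? with
    | some v0 =>
      match List.lookup v0 cell_group_color_dict with
      | some c => results.set 0 ("background-color: " ++ c)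
      | none => results
    | none => results
  match column_data[1]? with
  | some v1 =>
    match List.lookup v1 stateCT_color_dict with
    | some c => results.set 1 ("background-color: " ++ c)
    | none => results
  | none => results

-- ===== PRECONDITION & SPEC =====
def Spec_color_annot_cellgroup_stateCT (column_data : List String) (cell_group_color_dict : List (String × String)) (stateCT_color_dict : List (String × String)) (out : List String) : Prop := out = color_annot_cellgroup_stateCT_alt column_data cell_group_color_dict stateCT_color_dict
instance (column_data : List String) (cell_group_color_dict : List (String × String)) (stateCT_color_dict : List (String × String)) (out : List String) : Decidable (Spec_color_annot_cellgroup_stateCT column_data cell_group_color_dict stateCT_color_dict out) := by unfold Spec_color_annot_cellgroup_stateCT; infer_instance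

-- ===== CLAIM (what is proved, stated in full; the proofs are below) =====
def Claim_equal_color_annot_cellgroup_stateCT : Prop := ∀ (column_data : List String) (cell_group_color_dict : List (String × String)) (stateCT_color_dict : List (String × String)), Dom_color_annot_cellgroup_stateCT column_data cell_group_color_dict stateCT_color_dict → Spec_color_annot_cellgroup_stateCT column_data cell_group_color_dict stateCT_color_dict (color_annot_cellgroup_stateCT column_data cell_group_color_dict stateCT_color_dict)

-- ===== LEMMAS AND PROOFS =====

-- writing at the length of the prefix replaces the head of the suffix
theorem pv_set_mid (p r : List String) (x y : String) :
    (p ++ x :: r).set p.length y = p ++ y :: r := by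
  rw [List.set_append_right p.length y Nat.le.refl]; simp

-- A's loop over the tail (indices ≥ 2) just writes white into each slot
theorem pv_tail_white (ccd scd : List (String × String)) :
    ∀ (t p : List String), 2 ≤ p.length →
    (PySem.List.enumerate t (p.length : Int)).foldl (pvBodyA ccd scd)
      (p ++ List.replicate t.length "") =
    p ++ List.replicate t.length "background-color: #ffffff" := by
  intro t
  induction t with
  | nil => intro p hp; simp [PySem.List.enumerate]
  | cons v t' ih =>
    intro p hp
    rw [PySem.List.enumerate_cons, List.foldl_cons]
    have hbody : pvBodyA ccd scd (p ++ List.replicate (v :: t').length "")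
        ((p.length : Int), v)
        = (p ++ ["background-color: #ffffff"]) ++ List.replicate t'.length "" := by
      simp only [pvBodyA]
      rw [if_neg (by omega : ¬ ((p.length : Int) = 0)),
          if_neg (by omega : ¬ ((p.length : Int) = 1))]
      have ht : ((p.length : Int)).toNat = p.length := Int.toNat_natCast _
      rw [ht, List.length_cons, List.replicate_succ, pv_set_mid]
      simp
    rw [hbody]
    have hlen : ((p.length : Int) + 1)
        = (((p ++ ["background-color: #ffffff"]).length : Nat) : Int) := by
      simp
    rw [hlen, ih (p ++ ["background-color: #ffffff"]) (by simp; omega)]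
    simp [List.replicate_succ]

theorem color_annot_eq (column_data : List String)
    (ccd scd : List (String × String)) :
    color_annot_cellgroup_stateCT column_data ccd scd =
    color_annot_cellgroup_stateCT_alt column_data ccd scd := by
  match column_data with
  | [] => rfl
  | [a] =>
    simp only [color_annot_cellgroup_stateCT, color_annot_cellgroup_stateCT_alt]
    simp [PySem.List.enumerate, pvBodyA]
    cases List.lookup a ccd <;> rfl
  | a :: b :: t =>
    simp only [color_annot_cellgroup_stateCT]
    rw [show PySem.List.enumerate (a :: b :: t) = (0, a) :: (1, b) :: PySem.List.enumerate t 2 by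
      simp [PySem.List.enumerate_cons]]
    rw [List.foldl_cons, List.foldl_cons]
    set c0 : String := "background-color: " ++
      (match List.lookup a ccd with | some c => c | none => "#ffffff") with hc0
    set c1 : String := "background-color: " ++
      (match List.lookup b scd with | some c => c | none => "#ffffff") with hc1
    have h2 : pvBodyA ccd scd
        (pvBodyA ccd scd (List.replicate (a :: b :: t).length "") (0, a)) (1, b)
        = [c0, c1] ++ List.replicate t.length "" := by
      simp [pvBodyA, List.replicate_succ, hc0, hc1]
    rw [h2]
    rw [show (2 : Int) = (([c0, c1] : List String).length : Int) by simp]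
    rw [pv_tail_white ccd scd t [c0, c1] (by simp)]
    simp only [color_annot_cellgroup_stateCT_alt]
    cases hl0 : List.lookup a ccd <;> cases hl1 : List.lookup b scd <;>
      simp [hc0, hc1, hl0, hl1, List.replicate_succ] <;> try rfl

-- ===== VERDICT (by name: the statement is the Claim_ definition above) =====
theorem color_annot_cellgroup_stateCT_spec : Claim_equal_color_annot_cellgroup_stateCT := by
  intro cd ccd scd _
  unfold Spec_color_annot_cellgroup_stateCT
  exact color_annot_eq cd ccd scd
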